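-- pv_equiv track=rewrite | github.com/bellavergara/Desarrollo-de-Sistemas-IA | desarrollo_sistemas.py | ruta_valida_peso
-- ===== SOURCE A (Python) =====
-- from collections import deque
--
-- def ruta_valida_peso(grafo, origen, destino, peso):
--     q = deque([(origen, [origen])])
--     visitados = set()
--
--     while q:
--         actual, camino = q.popleft()
--         if actual == destino:
--             return camino
--         if actual in visitados:
--             continue
--         visitados.add(actual)
--
--         for vecino, limite in grafo.get(actual, {}).items():
--             if limite >= peso:
--                 q.append((vecino, camino + [vecino]))
--
--     return None
-- ===== SOURCE B (Python) =====
-- from collections import deque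
--
-- def ruta_valida_peso(grafo, origen, destino, peso):
--     # BFS with a parent-pointer record instead of copying the path at every
--     # enqueue: the path is reconstructed once, at the end.
--     nodes = [origen]      # record of every enqueued node
--     parents = [-1]        # parents[k] = index of the node that enqueued nodes[k]
--     q = deque([0])        # queue of indices into nodes/parents
--     visitados = set()
--
--     while q:
--         i = q.popleft()
--         actual = nodes[i]
--         if actual == destino:
--             camino = []
--             j = i
--             while j != -1:
--                 camino.append(nodes[j])
--                 j = parents[j]
--             camino.reverse()
--             return camino
--         if actual in visitados:
--             continue
--         visitados.add(actual)
--
--         for vecino, limite in grafo.get(actual, {}).items():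
--             if limite >= peso:
--                 q.append(len(nodes))
--                 nodes.append(vecino)
--                 parents.append(i)
--
--     return None
-- ===== Notes on version B (the rewrite author's own statement) =====
-- stated objective: alternative
-- what changed: The BFS queue stores indices into an append-only parent-pointer record instead of a full copy of the path per entry; the path is reconstructed once at the end by following parent pointers.
import Mathlib
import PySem

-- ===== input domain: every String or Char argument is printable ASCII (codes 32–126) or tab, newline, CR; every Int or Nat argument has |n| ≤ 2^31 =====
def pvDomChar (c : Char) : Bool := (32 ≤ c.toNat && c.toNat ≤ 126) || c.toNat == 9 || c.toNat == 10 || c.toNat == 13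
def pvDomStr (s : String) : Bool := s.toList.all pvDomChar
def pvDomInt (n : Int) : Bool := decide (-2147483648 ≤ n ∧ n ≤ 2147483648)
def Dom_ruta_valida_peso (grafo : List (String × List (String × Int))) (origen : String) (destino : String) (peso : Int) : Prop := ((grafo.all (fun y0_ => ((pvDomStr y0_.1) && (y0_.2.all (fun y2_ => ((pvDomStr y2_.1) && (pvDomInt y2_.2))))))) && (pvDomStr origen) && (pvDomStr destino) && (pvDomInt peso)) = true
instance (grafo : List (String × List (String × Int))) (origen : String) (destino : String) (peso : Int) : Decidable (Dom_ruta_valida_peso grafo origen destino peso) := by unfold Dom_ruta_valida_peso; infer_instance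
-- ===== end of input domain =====

-- B replaces A's per-enqueue path copying by an append-only parent-pointer
-- record with one reconstruction at the end (objective: alternative algorithm).

-- ===== PORT A =====
-- Python's grafo.get(actual, {}) on the association list (lookup = first match, default empty)
def rvpAdj (grafo : List (String × List (String × Int))) (k : String) : List (String × Int) :=
  match grafo.find? (fun p => p.1 == k) with
  | some p => p.2
  | none => []

-- fuel bound for the ports' while-loops: every pop consumes one queue entry and
-- the total number of enqueues is at most 1 + the number of edges of grafo
-- (each node is processed at most once); the bound is never reached, and both
-- ports run on the SAME fuel, returning none if it were ever exhausted.
def rvpFuel (grafo : List (String × List (String × Int))) : Nat :=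
  2 + (grafo.map (fun p => p.2.length)).sum

-- A's while-loop: queue of (node, path-so-far), visited marked at pop
def rvpLoopA (grafo : List (String × List (String × Int))) (destino : String) (peso : Int) :
    Nat → List (String × List String) → PySem.Set String → Option (List String)
  | 0, _, _ => none
  | _ + 1, [], _ => none
  | fuel + 1, (actual, camino) :: q, vis =>
    if actual == destino then some camino
    else if PySem.Set.contains vis actual then rvpLoopA grafo destino peso fuel q vis
    else
      rvpLoopA grafo destino peso fuel
        ((rvpAdj grafo actual).foldl
          (fun acc vl => if peso ≤ vl.2 then acc ++ [(vl.1, camino ++ [vl.1])] else acc) q)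
        (PySem.Set.add vis actual)

def ruta_valida_peso (grafo : List (String × List (String × Int))) (origen : String) (destino : String) (peso : Int) : Option (List String) :=
  rvpLoopA grafo destino peso (rvpFuel grafo) [(origen, [origen])] PySem.Set.empty

-- ===== PORT B =====
-- B's reconstruction loop: follow parent pointers (Python's -1 sentinel is
-- Option.none here), appending, then the caller reverses; fuel = nodes.length
-- is always sufficient since parent indices strictly decrease.
def rvpTraceB (nodes : List String) (parents : List (Option Nat)) :
    Nat → Option Nat → List String → List String
  | _, none, camino => camino
  | 0, some _, camino => camino
  | fuel + 1, some j, camino =>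
      rvpTraceB nodes parents fuel (parents.getD j none) (camino ++ [nodes.getD j ""])

-- B's while-loop: queue of record indices; nodes/parents are the append-only record
def rvpLoopB (grafo : List (String × List (String × Int))) (destino : String) (peso : Int) :
    Nat → List Nat → List String → List (Option Nat) → PySem.Set String → Option (List String)
  | 0, _, _, _, _ => none
  | _ + 1, [], _, _, _ => none
  | fuel + 1, i :: q, nodes, parents, vis =>
    let actual := nodes.getD i ""
    if actual == destino then
      some (rvpTraceB nodes parents nodes.length (some i) []).reverse
    else if PySem.Set.contains vis actual then rvpLoopB grafo destino peso fuel q nodes parents vis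
    else
      let s := (rvpAdj grafo actual).foldl
        (fun s vl => if peso ≤ vl.2 then (s.1 ++ [s.2.1.length], s.2.1 ++ [vl.1], s.2.2 ++ [some i]) else s)
        (q, nodes, parents)
      rvpLoopB grafo destino peso fuel s.1 s.2.1 s.2.2 (PySem.Set.add vis actual)

def ruta_valida_peso_alt (grafo : List (String × List (String × Int))) (origen : String) (destino : String) (peso : Int) : Option (List String) :=
  rvpLoopB grafo destino peso (rvpFuel grafo) [0] [origen] [none] PySem.Set.empty

-- ===== PRECONDITION & SPEC =====
def Spec_ruta_valida_peso (grafo : List (String × List (String × Int))) (origen : String) (destino : String) (peso : Int) (out : Option (List String)) : Prop := out = ruta_valida_peso_alt grafo origen destino peso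
instance (grafo : List (String × List (String × Int))) (origen : String) (destino : String) (peso : Int) (out : Option (List String)) : Decidable (Spec_ruta_valida_peso grafo origen destino peso out) := by unfold Spec_ruta_valida_peso; infer_instance

-- ===== CLAIM (what is proved, stated in full; the proofs are below) =====
def Claim_equal_ruta_valida_peso : Prop := ∀ (grafo : List (String × List (String × Int))) (origen : String) (destino : String) (peso : Int), Dom_ruta_valida_peso grafo origen destino peso → Spec_ruta_valida_peso grafo origen destino peso (ruta_valida_peso grafo origen destino peso)

-- ===== LEMMAS AND PROOFS =====

-- the path from the root to record j, read off the parent pointers (proof-side spec)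
def rvpTraceAux (nodes : List String) (parents : List (Option Nat)) : Nat → Nat → List String
  | 0, j => [nodes.getD j ""]
  | fuel + 1, j =>
    match parents.getD j none with
    | none => [nodes.getD j ""]
    | some p => rvpTraceAux nodes parents fuel p ++ [nodes.getD j ""]

def rvpTrace (nodes : List String) (parents : List (Option Nat)) (j : Nat) : List String :=
  rvpTraceAux nodes parents j j

-- well-formedness of the parent record: parent indices strictly decrease
def rvpWF (parents : List (Option Nat)) : Prop :=
  ∀ j p, parents.getD j none = some p → p < j

theorem rvpTraceAux_zero (nodes : List String) (parents : List (Option Nat)) (j : Nat) :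
    rvpTraceAux nodes parents 0 j = [nodes.getD j ""] := rfl

theorem rvpTraceAux_succ_none (nodes : List String) (parents : List (Option Nat))
    (f j : Nat) (h : parents.getD j none = none) :
    rvpTraceAux nodes parents (f + 1) j = [nodes.getD j ""] := by
  simp only [rvpTraceAux]
  rw [h]

theorem rvpTraceAux_succ_some (nodes : List String) (parents : List (Option Nat))
    (f j p : Nat) (h : parents.getD j none = some p) :
    rvpTraceAux nodes parents (f + 1) j = rvpTraceAux nodes parents f p ++ [nodes.getD j ""] := by
  simp only [rvpTraceAux]
  rw [h]

theorem rvpTraceAux_congr (nodes : List String) (parents : List (Option Nat))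
    (hwf : rvpWF parents) :
    ∀ f1 f2 j, j ≤ f1 → j ≤ f2 →
      rvpTraceAux nodes parents f1 j = rvpTraceAux nodes parents f2 j := by
  intro f1
  induction f1 with
  | zero =>
    intro f2 j h1 _
    have hj : j = 0 := Nat.le_zero.mp h1
    subst hj
    have h0 : parents.getD 0 none = none := by
      cases hp : parents.getD 0 none with
      | none => rfl
      | some p => exact absurd (hwf 0 p hp) (by omega)
    cases f2 with
    | zero => rfl
    | succ f2' => rw [rvpTraceAux_zero, rvpTraceAux_succ_none nodes parents f2' 0 h0]
  | succ f1' ih =>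
    intro f2 j h1 h2
    cases hp : parents.getD j none with
    | none =>
      cases f2 with
      | zero =>
        have hj : j = 0 := Nat.le_zero.mp h2
        subst hj
        rw [rvpTraceAux_zero, rvpTraceAux_succ_none nodes parents f1' 0 hp]
      | succ f2' =>
        rw [rvpTraceAux_succ_none nodes parents f1' j hp,
          rvpTraceAux_succ_none nodes parents f2' j hp]
    | some p =>
      have hpj : p < j := hwf j p hp
      cases f2 with
      | zero => omega
      | succ f2' =>
        rw [rvpTraceAux_succ_some nodes parents f1' j p hp,
          rvpTraceAux_succ_some nodes parents f2' j p hp,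
          ih f2' p (by omega) (by omega)]

theorem rvpTrace_unfold_none (nodes : List String) (parents : List (Option Nat))
    (j : Nat) (h : parents.getD j none = none) :
    rvpTrace nodes parents j = [nodes.getD j ""] := by
  cases j with
  | zero => exact rvpTraceAux_zero nodes parents 0
  | succ k => exact rvpTraceAux_succ_none nodes parents k (k + 1) h

theorem rvpTrace_unfold_some (nodes : List String) (parents : List (Option Nat))
    (hwf : rvpWF parents) (j p : Nat) (h : parents.getD j none = some p) :
    rvpTrace nodes parents j = rvpTrace nodes parents p ++ [nodes.getD j ""] := by
  have hpj : p < j := hwf j p h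
  obtain ⟨k, rfl⟩ : ∃ k, j = k + 1 := ⟨j - 1, by omega⟩
  show rvpTraceAux nodes parents (k + 1) (k + 1) = _
  rw [rvpTraceAux_succ_some nodes parents k (k + 1) p h,
    rvpTraceAux_congr nodes parents hwf k p p (by omega) (le_refl p)]
  rfl

theorem rvpTraceAux_append (nodes e : List String) (parents f : List (Option Nat))
    (hlen : parents.length = nodes.length) (hwf : rvpWF parents) :
    ∀ fuel j, j < nodes.length →
      rvpTraceAux (nodes ++ e) (parents ++ f) fuel j = rvpTraceAux nodes parents fuel j := by
  intro fuel
  induction fuel with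
  | zero =>
    intro j hj
    rw [rvpTraceAux_zero, rvpTraceAux_zero, List.getD_append _ _ _ _ hj]
  | succ f' ih =>
    intro j hj
    have hp : (parents ++ f).getD j none = parents.getD j none :=
      List.getD_append _ _ _ _ (by omega)
    cases hq : parents.getD j none with
    | none =>
      rw [rvpTraceAux_succ_none (nodes ++ e) (parents ++ f) f' j (by rw [hp, hq]),
        rvpTraceAux_succ_none nodes parents f' j hq, List.getD_append _ _ _ _ hj]
    | some p =>
      have : p < j := hwf j p hq
      rw [rvpTraceAux_succ_some (nodes ++ e) (parents ++ f) f' j p (by rw [hp, hq]),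
        rvpTraceAux_succ_some nodes parents f' j p hq,
        ih p (by omega), List.getD_append _ _ _ _ hj]

theorem rvpTrace_append (nodes e : List String) (parents f : List (Option Nat))
    (hlen : parents.length = nodes.length) (hwf : rvpWF parents) :
    ∀ j, j < nodes.length →
      rvpTrace (nodes ++ e) (parents ++ f) j = rvpTrace nodes parents j := by
  intro j hj
  exact rvpTraceAux_append nodes e parents f hlen hwf j j hj

theorem rvpTraceB_eq (nodes : List String) (parents : List (Option Nat))
    (hwf : rvpWF parents) :
    ∀ fuel i acc, i < fuel →
      rvpTraceB nodes parents fuel (some i) acc = acc ++ (rvpTrace nodes parents i).reverse := by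
  intro fuel
  induction fuel with
  | zero => intro i acc h; omega
  | succ f ih =>
    intro i acc h
    have step : rvpTraceB nodes parents (f + 1) (some i) acc
        = rvpTraceB nodes parents f (parents.getD i none) (acc ++ [nodes.getD i ""]) := rfl
    cases hp : parents.getD i none with
    | none =>
      rw [step, hp, rvpTrace_unfold_none nodes parents i hp]
      cases f <;> simp [rvpTraceB]
    | some p =>
      have hpi : p < i := hwf i p hp
      rw [step, hp, ih p _ (by omega), rvpTrace_unfold_some nodes parents hwf i p hp]
      simp

theorem rvp_fold_rel (_grafo : List (String × List (String × Int))) (peso : Int) (i : Nat) :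
    ∀ (adj : List (String × Int)) (q : List Nat) (nodes : List String) (parents : List (Option Nat)),
      parents.length = nodes.length → rvpWF parents → i < nodes.length →
      (∀ x ∈ q, x < nodes.length) →
      (let r := adj.foldl
          (fun s vl => if peso ≤ vl.2 then (s.1 ++ [s.2.1.length], s.2.1 ++ [vl.1], s.2.2 ++ [some i]) else s)
          (q, nodes, parents)
       r.2.2.length = r.2.1.length ∧ rvpWF r.2.2 ∧ (∀ x ∈ r.1, x < r.2.1.length) ∧
       r.1.map (fun j => (r.2.1.getD j "", rvpTrace r.2.1 r.2.2 j))
         = adj.foldl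
             (fun acc vl => if peso ≤ vl.2 then acc ++ [(vl.1, rvpTrace nodes parents i ++ [vl.1])] else acc)
             (q.map (fun j => (nodes.getD j "", rvpTrace nodes parents j)))) := by
  intro adj
  induction adj with
  | nil =>
    intro q nodes parents hlen hwf hi hq
    exact ⟨hlen, hwf, hq, rfl⟩
  | cons vl adj ih =>
    intro q nodes parents hlen hwf hi hq
    by_cases hl : peso ≤ vl.2
    · -- the edge is kept: one record is appended
      have hlen' : (parents ++ [some i]).length = (nodes ++ [vl.1]).length := by
        simp [hlen]
      have hpar : (parents ++ [some i]).getD parents.length none = some i := by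
        simp [List.getD]
      have hwf' : rvpWF (parents ++ [some i]) := by
        intro j p hp
        rcases lt_trichotomy j parents.length with hj | hj | hj
        · exact hwf j p (by rwa [List.getD_append _ _ _ _ hj] at hp)
        · subst hj
          rw [hpar] at hp
          injection hp with hip
          omega
        · have hnone : (parents ++ [some i]).getD j none = none := by
            apply List.getD_eq_default
            simp
            omega
          rw [hnone] at hp
          exact absurd hp (by simp)
      have hi' : i < (nodes ++ [vl.1]).length := by simp; omega
      have hq' : ∀ x ∈ q ++ [nodes.length], x < (nodes ++ [vl.1]).length := by
        intro x hx
        simp at hx ⊢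
        rcases hx with hx | hx
        · have := hq x hx; omega
        · omega
      have key := ih (q ++ [nodes.length]) (nodes ++ [vl.1]) (parents ++ [some i]) hlen' hwf' hi' hq'
      -- bridge the accumulators
      have hnew : (nodes ++ [vl.1]).getD nodes.length "" = vl.1 := by
        simp [List.getD]
      have hpar' : (parents ++ [some i]).getD nodes.length none = some i := by
        rw [← hlen]
        exact hpar
      have htr_new : rvpTrace (nodes ++ [vl.1]) (parents ++ [some i]) nodes.length
          = rvpTrace nodes parents i ++ [vl.1] := by
        rw [rvpTrace_unfold_some (nodes ++ [vl.1]) (parents ++ [some i]) hwf' nodes.length i hpar',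
          hnew, rvpTrace_append nodes [vl.1] parents [some i] hlen hwf i hi]
      have hmap : (q ++ [nodes.length]).map
            (fun j => ((nodes ++ [vl.1]).getD j "", rvpTrace (nodes ++ [vl.1]) (parents ++ [some i]) j))
          = q.map (fun j => (nodes.getD j "", rvpTrace nodes parents j))
            ++ [(vl.1, rvpTrace nodes parents i ++ [vl.1])] := by
        rw [List.map_append]
        congr 1
        · apply List.map_congr_left
          intro x hx
          have hxl := hq x hx
          rw [List.getD_append _ _ _ _ hxl, rvpTrace_append nodes [vl.1] parents [some i] hlen hwf x hxl]
        · simp [htr_new]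
      have htr_i : rvpTrace (nodes ++ [vl.1]) (parents ++ [some i]) i = rvpTrace nodes parents i :=
        rvpTrace_append nodes [vl.1] parents [some i] hlen hwf i hi
      simp only [List.foldl_cons, if_pos hl] at key ⊢
      rw [hmap, htr_i] at key
      exact key
    · simp only [List.foldl_cons, if_neg hl]
      exact ih q nodes parents hlen hwf hi hq

theorem rvp_loops_eq (grafo : List (String × List (String × Int))) (destino : String) (peso : Int) :
    ∀ fuel (q : List Nat) (nodes : List String) (parents : List (Option Nat)) (vis : PySem.Set String),
      parents.length = nodes.length → rvpWF parents → (∀ x ∈ q, x < nodes.length) →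
      rvpLoopA grafo destino peso fuel (q.map (fun j => (nodes.getD j "", rvpTrace nodes parents j))) vis
        = rvpLoopB grafo destino peso fuel q nodes parents vis := by
  intro fuel
  induction fuel with
  | zero => intro q nodes parents vis _ _ _; rfl
  | succ f ih =>
    intro q nodes parents vis hlen hwf hq
    cases q with
    | nil => rfl
    | cons i q' =>
      have hi : i < nodes.length := hq i (by simp)
      simp only [List.map_cons, rvpLoopA, rvpLoopB]
      by_cases hd : (nodes.getD i "" == destino) = true
      · simp only [hd, if_pos]
        rw [rvpTraceB_eq nodes parents hwf nodes.length i [] hi]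
        simp
      · simp only [hd]
        by_cases hv : PySem.Set.contains vis (nodes.getD i "") = true
        · simp only [hv, if_true, Bool.false_eq_true, if_false]
          exact ih q' nodes parents vis hlen hwf (fun x hx => hq x (by simp [hx]))
        · simp only [hv, Bool.false_eq_true, if_false]
          have key := rvp_fold_rel grafo peso i (rvpAdj grafo (nodes.getD i "")) q' nodes parents
            hlen hwf hi (fun x hx => hq x (by simp [hx]))
          simp only at key
          obtain ⟨k1, k2, k3, k4⟩ := key
          rw [← k4]
          exact ih _ _ _ _ k1 k2 k3

-- ===== VERDICT (by name: the statement is the Claim_ definition above) =====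
theorem ruta_valida_peso_spec : Claim_equal_ruta_valida_peso := by
  intro grafo origen destino peso _
  unfold Spec_ruta_valida_peso ruta_valida_peso ruta_valida_peso_alt
  have h := rvp_loops_eq grafo destino peso (rvpFuel grafo) [0] [origen] [none] PySem.Set.empty
    (by simp) (by intro j p hp; rcases j with _ | j <;> simp [List.getD] at hp) (by simp)
  simpa [rvpTrace, rvpTraceAux] using h
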